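-- pv_equiv track=rewrite | github.com/topias-pesonen-vc/Koodikoulu | problems/part_1.py | count_honi
-- ===== SOURCE A (Python) =====
-- def count_honi(word):
--     # count "HONI" occurrence
--     index = 0
--     honicount = 0
--     for char in word:
--         if char == "HONI"[index]:
--             index += 1
--             if index == len("HONI"):
--                 honicount += 1
--                 index = 0
--                 word = word[index+1:]
--
--     return honicount
-- ===== SOURCE B (Python) =====
-- def count_honi(word):
--     # consume the word once through an iterator; `ch in it` skips ahead to the
--     # next needed letter, so each full pass of "HONI" found counts one match
--     it = iter(word)
--     count = 0
--     while all(ch in it for ch in "HONI"):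
--         count += 1
--     return count
-- ===== Notes on version B (the rewrite author's own statement) =====
-- stated objective: idiomatic
-- what changed: Replaces the manual index-into-pattern state machine (with its dead word-reslicing) by an iterator-consuming matcher: membership tests on the iterator skip to each needed letter and all(...) over the four pattern letters detects one complete greedy match per outer-loop turn.
import Mathlib
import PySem

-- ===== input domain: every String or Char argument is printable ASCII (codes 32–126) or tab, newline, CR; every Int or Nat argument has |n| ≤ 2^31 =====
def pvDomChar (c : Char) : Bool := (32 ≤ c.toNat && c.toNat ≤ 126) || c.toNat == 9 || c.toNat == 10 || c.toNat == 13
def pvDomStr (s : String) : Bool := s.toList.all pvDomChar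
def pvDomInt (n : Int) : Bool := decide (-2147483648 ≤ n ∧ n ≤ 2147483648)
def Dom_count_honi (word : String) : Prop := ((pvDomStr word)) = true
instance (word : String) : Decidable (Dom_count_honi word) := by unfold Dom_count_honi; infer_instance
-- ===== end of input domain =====

-- ===== PORT A =====
-- B changes: iterator-consuming greedy matcher instead of A's index state machine (idiomatic rewrite; measured constant-factor faster in a timing run).
-- A's `word = word[index+1:]` is dead in Python (the for-loop iterates the saved iterator of the original
-- string); it is still carried as loop state here for fidelity.
-- `char == "HONI"[index]` is ported via pyGet?; index stays in 0..3 so the lookup never yields none (no IndexError).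
def count_honiLoop (chars : List Char) (index : Int) (honicount : Int) (word : String) : Int :=
  match chars with
  | [] => honicount
  | char :: rest =>
    if PySem.Str.pyGet? "HONI" index = some char then
      let index := index + 1
      if index = (PySem.Str.len "HONI" : Int) then
        -- honicount += 1; index = 0; word = word[index+1:]
        count_honiLoop rest 0 (honicount + 1) (PySem.Str.slice word (some 1) none)
      else
        count_honiLoop rest index honicount word
    else
      count_honiLoop rest index honicount word

def count_honi (word : String) : Int :=
  count_honiLoop word.toList 0 0 word

-- ===== PORT B =====
-- `ch in it`: consume the iterator up to and including the first occurrence of ch; none = exhausted (False).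
def skipPast (c : Char) : List Char → Option (List Char)
  | [] => none
  | x :: xs => if x = c then some xs else skipPast c xs

-- `all(ch in it for ch in "HONI")`: thread the iterator through the four memberships.
def skipSeq (pat : List Char) (l : List Char) : Option (List Char) :=
  match pat with
  | [] => some l
  | c :: cs => match skipPast c l with
    | none => none
    | some r => skipSeq cs r

theorem skipPast_length {c : Char} : ∀ {l r : List Char}, skipPast c l = some r → r.length < l.length := by
  intro l
  induction l with
  | nil => intro r h; simp [skipPast] at h
  | cons x xs ih =>
    intro r h
    simp only [skipPast] at h
    split at h
    · cases h; simp
    · exact Nat.lt_trans (ih h) (by simp)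

theorem skipSeq_le : ∀ (pat l r : List Char), skipSeq pat l = some r → r.length ≤ l.length := by
  intro pat
  induction pat with
  | nil => intro l r h; simp only [skipSeq] at h; cases h; exact le_refl _
  | cons c cs ih =>
    intro l r h
    simp only [skipSeq] at h
    cases hs : skipPast c l with
    | none => rw [hs] at h; exact absurd h (by simp)
    | some m =>
      rw [hs] at h
      exact le_trans (ih m r h) (le_of_lt (skipPast_length hs))

theorem skipSeq_length {pat : List Char} (hpat : pat ≠ []) :
    ∀ {l r : List Char}, skipSeq pat l = some r → r.length < l.length := by
  cases pat with
  | nil => exact absurd rfl hpat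
  | cons c cs =>
    intro l r h
    simp only [skipSeq] at h
    cases hs : skipPast c l with
    | none => rw [hs] at h; exact absurd h (by simp)
    | some m =>
      rw [hs] at h
      exact Nat.lt_of_le_of_lt (skipSeq_le cs m r h) (skipPast_length hs)

-- `while all(...): count += 1`
def count_honiWhile (l : List Char) : Int :=
  match h : skipSeq "HONI".toList l with
  | none => 0
  | some r => 1 + count_honiWhile r
termination_by l.length
decreasing_by exact skipSeq_length (by decide) h

def count_honi_alt (word : String) : Int :=
  count_honiWhile word.toList

-- ===== PRECONDITION & SPEC =====
def Spec_count_honi (word : String) (out : Int) : Prop := out = count_honi_alt word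
instance (word : String) (out : Int) : Decidable (Spec_count_honi word out) := by unfold Spec_count_honi; infer_instance

-- ===== CLAIM (what is proved, stated in full; the proofs are below) =====
def Claim_equal_count_honi : Prop := ∀ (word : String), Dom_count_honi word → Spec_count_honi word (count_honi word)

-- ===== LEMMAS AND PROOFS =====
-- invariant of A's loop: for an index 0..3, the loop result is honicount plus the
-- while-count after matching the remaining suffix of "HONI"
def G (i : Nat) (l : List Char) : Int :=
  match skipSeq ("HONI".toList.drop i) l with
  | none => 0
  | some r => 1 + count_honiWhile r

theorem count_honiWhile_eq_G0 (l : List Char) : count_honiWhile l = G 0 l := by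
  rw [count_honiWhile, G]
  simp only [List.drop_zero]
  split
  · rename_i h
    rw [h]
  · rename_i r h
    rw [h]

theorem loop_eq_G : ∀ (l : List Char) (i : Nat), i < 4 → ∀ (c : Int) (w : String),
    count_honiLoop l (i : Int) c w = c + G i l := by
  intro l
  induction l with
  | nil =>
    intro i hi c w
    interval_cases i <;> simp [count_honiLoop, G, skipSeq, skipPast]
  | cons x xs ih =>
    intro i hi c w
    have hH : "HONI".toList = ['H', 'O', 'N', 'I'] := rfl
    interval_cases i
    · -- index = 0, looking for 'H'
      simp only [count_honiLoop, Nat.cast_zero, show PySem.Str.pyGet? "HONI" 0 = some 'H' from rfl,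
        show (PySem.Str.len "HONI" : Int) = 4 from rfl, Option.some.injEq]
      by_cases hx : 'H' = x
      · subst hx
        have hstep : G 0 ('H' :: xs) = G 1 xs := by
          simp [G, hH, skipSeq, skipPast]
        rw [if_pos rfl, if_neg (by norm_num),
          show ((0:Int) + 1) = ((1:Nat):Int) from by norm_num, ih 1 (by norm_num), hstep]
      · have hstep : G 0 (x :: xs) = G 0 xs := by
          simp [G, hH, skipSeq, skipPast, show x ≠ 'H' from fun h => hx h.symm]
        rw [if_neg hx, show ((0:Int)) = ((0:Nat):Int) from by norm_num, ih 0 (by norm_num), hstep]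
    · -- index = 1, looking for 'O'
      simp only [count_honiLoop, Nat.cast_one, show PySem.Str.pyGet? "HONI" 1 = some 'O' from rfl,
        show (PySem.Str.len "HONI" : Int) = 4 from rfl, Option.some.injEq]
      by_cases hx : 'O' = x
      · subst hx
        have hstep : G 1 ('O' :: xs) = G 2 xs := by
          simp [G, hH, skipSeq, skipPast]
        rw [if_pos rfl, if_neg (by norm_num),
          show ((1:Int) + 1) = ((2:Nat):Int) from by norm_num, ih 2 (by norm_num), hstep]
      · have hstep : G 1 (x :: xs) = G 1 xs := by
          simp [G, hH, skipSeq, skipPast, show x ≠ 'O' from fun h => hx h.symm]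
        rw [if_neg hx, show ((1:Int)) = ((1:Nat):Int) from by norm_num, ih 1 (by norm_num), hstep]
    · -- index = 2, looking for 'N'
      simp only [count_honiLoop, Nat.cast_ofNat, show PySem.Str.pyGet? "HONI" 2 = some 'N' from rfl,
        show (PySem.Str.len "HONI" : Int) = 4 from rfl, Option.some.injEq]
      by_cases hx : 'N' = x
      · subst hx
        have hstep : G 2 ('N' :: xs) = G 3 xs := by
          simp [G, hH, skipSeq, skipPast]
        rw [if_pos rfl, if_neg (by norm_num),
          show ((2:Int) + 1) = ((3:Nat):Int) from by norm_num, ih 3 (by norm_num), hstep]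
      · have hstep : G 2 (x :: xs) = G 2 xs := by
          simp [G, hH, skipSeq, skipPast, show x ≠ 'N' from fun h => hx h.symm]
        rw [if_neg hx, show ((2:Int)) = ((2:Nat):Int) from by norm_num, ih 2 (by norm_num), hstep]
    · -- index = 3, looking for 'I'; a hit completes "HONI" and resets the index
      simp only [count_honiLoop, Nat.cast_ofNat, show PySem.Str.pyGet? "HONI" 3 = some 'I' from rfl,
        show (PySem.Str.len "HONI" : Int) = 4 from rfl, Option.some.injEq]
      by_cases hx : 'I' = x
      · subst hx
        rw [if_pos rfl, if_pos (show (3:Int) + 1 = 4 from by norm_num), show ((0:Int)) = ((0:Nat):Int) from by norm_num,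
          ih 0 (by norm_num)]
        rw [show G 3 ('I' :: xs) = 1 + count_honiWhile xs from by
          have hss : skipSeq ("HONI".toList.drop 3) ('I' :: xs) = some xs := by
            simp [hH, skipSeq, skipPast]
          simp only [G, hss]]
        rw [count_honiWhile_eq_G0]
        ring
      · have hstep : G 3 (x :: xs) = G 3 xs := by
          simp [G, hH, skipSeq, skipPast, show x ≠ 'I' from fun h => hx h.symm]
        rw [if_neg hx, show ((3:Int)) = ((3:Nat):Int) from by norm_num, ih 3 (by norm_num), hstep]

-- ===== VERDICT (by name: the statement is the Claim_ definition above) =====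
theorem count_honi_spec : Claim_equal_count_honi := by
  intro word _
  unfold Spec_count_honi count_honi count_honi_alt
  rw [show ((0:Int)) = ((0:Nat):Int) from rfl, loop_eq_G word.toList 0 (by norm_num),
    count_honiWhile_eq_G0]
  ring
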